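-- pv_equiv track=rewrite | github.com/StanleyBt/prod_bee | core/validation.py | validate_file_path
-- ===== SOURCE A (Python) =====
-- def validate_file_path(path: str) -> bool:
--     """Validate file path to prevent path traversal attacks."""
--     # Check for path traversal attempts
--     if '..' in path or '//' in path:
--         return False
--
--     # Check for absolute paths
--     if path.startswith('/') or path.startswith('\\'):
--         return False
--
--     # Check for dangerous characters
--     dangerous_chars = ['<', '>', ':', '"', '|', '?', '*']
--     if any(char in path for char in dangerous_chars):
--         return False
--
--     return True
-- ===== SOURCE B (Python) =====
-- def validate_file_path(path: str) -> bool: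
--     """Validate file path to prevent path traversal attacks."""
--     if path[:1] in ('/', '\\'):
--         return False
--     prev = ''
--     for ch in path:
--         if ch in '<>:"|?*' or (ch == '.' and prev == '.') or (ch == '/' and prev == '/'):
--             return False
--         prev = ch
--     return True
-- ===== Notes on version B (the rewrite author's own statement) =====
-- stated objective: alternative
-- what changed: Replaces four independent substring/prefix/membership scans of the string with one left-to-right pass that keeps the previous character, detecting the forbidden adjacent-pair patterns and dangerous characters on the fly (prefix check kept separately).
import Mathlib
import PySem

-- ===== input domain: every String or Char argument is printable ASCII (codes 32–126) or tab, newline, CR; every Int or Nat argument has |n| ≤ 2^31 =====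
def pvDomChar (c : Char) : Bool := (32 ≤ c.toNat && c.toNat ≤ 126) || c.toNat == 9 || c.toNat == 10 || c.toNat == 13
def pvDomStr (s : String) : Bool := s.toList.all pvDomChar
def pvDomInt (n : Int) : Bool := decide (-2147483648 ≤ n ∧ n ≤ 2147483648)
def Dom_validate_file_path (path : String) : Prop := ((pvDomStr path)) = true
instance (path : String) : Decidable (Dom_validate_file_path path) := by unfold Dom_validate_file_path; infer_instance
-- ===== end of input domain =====

-- B replaces A's four sequential substring/prefix/membership scans by one left-to-right
-- pass with a one-character lookbehind (objective: alternative single-pass algorithm).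

-- ===== PORT A =====
def pvDangerousA : List Char := ['<', '>', ':', '"', '|', '?', '*']

def validate_file_path (path : String) : Bool :=
  let cs := path.toList
  if PySem.Chars.isIn ['.', '.'] cs || PySem.Chars.isIn ['/', '/'] cs then false
  else if PySem.Chars.startswith cs ['/'] || PySem.Chars.startswith cs ['\\'] then false
  else if pvDangerousA.any (fun ch => PySem.Chars.isIn [ch] cs) then false
  else true

-- ===== PORT B =====
-- the loop: prev is the previous character (none at the start, like Python's '')
def pvScan : Option Char → List Char → Bool
  | _, [] => true
  | prev, c :: rest =>
    if c ∈ ['<', '>', ':', '"', '|', '?', '*'] || (c = '.' && prev = some '.')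
        || (c = '/' && prev = some '/') then false
    else pvScan (some c) rest

def validate_file_path_alt (path : String) : Bool :=
  let cs := path.toList
  if cs.take 1 = ['/'] ∨ cs.take 1 = ['\\'] then false
  else pvScan none cs

-- ===== PRECONDITION & SPEC =====
def Spec_validate_file_path (path : String) (out : Bool) : Prop := out = validate_file_path_alt path
instance (path : String) (out : Bool) : Decidable (Spec_validate_file_path path out) := by unfold Spec_validate_file_path; infer_instance

-- ===== CLAIM (what is proved, stated in full; the proofs are below) =====
def Claim_equal_validate_file_path : Prop := ∀ (path : String), Dom_validate_file_path path → Spec_validate_file_path path (validate_file_path path)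

-- ===== LEMMAS AND PROOFS =====

lemma pv_singleton_prefix_iff (x : Char) (cs : List Char) :
    [x] <+: cs ↔ cs.head? = some x := by
  cases cs with
  | nil => simp
  | cons c rest => simp [List.cons_prefix_cons, eq_comm]

lemma pv_pair_infix_cons (x c : Char) (rest : List Char) :
    [x, x] <:+: c :: rest ↔ (c = x ∧ rest.head? = some x) ∨ [x, x] <:+: rest := by
  rw [List.infix_cons_iff, List.cons_prefix_cons, pv_singleton_prefix_iff]
  tauto

lemma pvScan_eq_false_iff (cs : List Char) : ∀ (prev : Option Char),
    pvScan prev cs = false ↔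
      ((∃ c ∈ cs, c ∈ pvDangerousA) ∨ [('.' : Char), '.'] <:+: cs ∨ [('/' : Char), '/'] <:+: cs
        ∨ (prev = some '.' ∧ cs.head? = some '.') ∨ (prev = some '/' ∧ cs.head? = some '/')) := by
  induction cs with
  | nil => intro prev; simp [pvScan]
  | cons c rest ih =>
    intro prev
    rw [pv_pair_infix_cons, pv_pair_infix_cons]
    by_cases hc : c ∈ ['<', '>', ':', '"', '|', '?', '*'] ∨ (c = '.' ∧ prev = some '.')
        ∨ (c = '/' ∧ prev = some '/')
    · constructor
      · intro _
        rcases hc with h | ⟨h1, h2⟩ | ⟨h1, h2⟩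
        · exact Or.inl ⟨c, by simp, by simpa [pvDangerousA] using h⟩
        · exact Or.inr (Or.inr (Or.inr (Or.inl ⟨h2, by simp [h1]⟩)))
        · exact Or.inr (Or.inr (Or.inr (Or.inr ⟨h2, by simp [h1]⟩)))
      · intro _
        simp only [pvScan]
        rcases hc with h | ⟨h1, h2⟩ | ⟨h1, h2⟩
        · simp [h]
        · simp [h1, h2]
        · simp [h1, h2]
    · push_neg at hc
      obtain ⟨h1, h2, h3⟩ := hc
      have hstep : pvScan prev (c :: rest) = pvScan (some c) rest := by
        simp only [pvScan]
        split
        · rename_i hcond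
          simp only [Bool.or_eq_true, Bool.and_eq_true, decide_eq_true_eq] at hcond
          exfalso
          rcases hcond with (h | ⟨ha, hb⟩) | ⟨ha, hb⟩
          · exact h1 h
          · exact h2 ha hb
          · exact h3 ha hb
        · rfl
      rw [hstep, ih (some c)]
      constructor
      · rintro (⟨d, hd, hdang⟩ | hinf | hinf | ⟨hp, hh⟩ | ⟨hp, hh⟩)
        · exact Or.inl ⟨d, by simp [hd], hdang⟩
        · exact Or.inr (Or.inl (Or.inr hinf))
        · exact Or.inr (Or.inr (Or.inl (Or.inr hinf)))
        · exact Or.inr (Or.inl (Or.inl ⟨by simpa using hp, hh⟩))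
        · exact Or.inr (Or.inr (Or.inl (Or.inl ⟨by simpa using hp, hh⟩)))
      · rintro (⟨d, hd, hdang⟩ | (⟨hcx, hh⟩ | hinf) | (⟨hcx, hh⟩ | hinf) | ⟨hp, hh⟩ | ⟨hp, hh⟩)
        · rcases List.mem_cons.mp hd with rfl | hd'
          · exact absurd (by simpa [pvDangerousA] using hdang) h1
          · exact Or.inl ⟨d, hd', hdang⟩
        · exact Or.inr (Or.inr (Or.inr (Or.inl ⟨by simp [hcx], hh⟩)))
        · exact Or.inr (Or.inl hinf)
        · exact Or.inr (Or.inr (Or.inr (Or.inr ⟨by simp [hcx], hh⟩)))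
        · exact Or.inr (Or.inr (Or.inl hinf))
        · exact absurd hp (h2 (by simpa using hh))
        · exact absurd hp (h3 (by simpa using hh))

lemma pv_take_one_eq_iff (cs : List Char) (x : Char) :
    cs.take 1 = [x] ↔ cs.head? = some x := by
  cases cs <;> simp

lemma pv_bodies_eq (cs : List Char) :
    (if PySem.Chars.isIn ['.', '.'] cs || PySem.Chars.isIn ['/', '/'] cs then false
     else if PySem.Chars.startswith cs ['/'] || PySem.Chars.startswith cs ['\\'] then false
     else if pvDangerousA.any (fun ch => PySem.Chars.isIn [ch] cs) then false
     else true)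
    = (if cs.take 1 = ['/'] ∨ cs.take 1 = ['\\'] then false else pvScan none cs) := by
  by_cases hdot : [('.' : Char), '.'] <:+: cs
  · have hA : PySem.Chars.isIn ['.', '.'] cs = true := (PySem.Chars.isIn_iff_infix _ _).mpr hdot
    have hB : pvScan none cs = false := (pvScan_eq_false_iff cs none).mpr (by tauto)
    rw [hA, Bool.true_or, if_pos rfl, hB]
    split <;> rfl
  · by_cases hslash : [('/' : Char), '/'] <:+: cs
    · have hA : PySem.Chars.isIn ['/', '/'] cs = true := (PySem.Chars.isIn_iff_infix _ _).mpr hslash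
      have hB : pvScan none cs = false := (pvScan_eq_false_iff cs none).mpr (by tauto)
      rw [hA, Bool.or_true, if_pos rfl, hB]
      split <;> rfl
    · have hA1 : PySem.Chars.isIn ['.', '.'] cs = false := (PySem.Chars.isIn_eq_false_iff _ _).mpr hdot
      have hA2 : PySem.Chars.isIn ['/', '/'] cs = false := (PySem.Chars.isIn_eq_false_iff _ _).mpr hslash
      rw [hA1, hA2]
      simp only [Bool.or_self, Bool.false_eq_true, if_false]
      by_cases hpre : cs.head? = some '/' ∨ cs.head? = some '\\'
      · have hs1 : (PySem.Chars.startswith cs ['/'] || PySem.Chars.startswith cs ['\\']) = true := by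
          rcases hpre with h | h
          · rw [(PySem.Chars.startswith_iff cs ['/']).mpr ((pv_singleton_prefix_iff '/' cs).mpr h)]
            rfl
          · rw [(PySem.Chars.startswith_iff cs ['\\']).mpr ((pv_singleton_prefix_iff '\\' cs).mpr h)]
            simp
        have hTake : cs.take 1 = ['/'] ∨ cs.take 1 = ['\\'] := by
          rw [pv_take_one_eq_iff, pv_take_one_eq_iff]; exact hpre
        rw [hs1, if_pos rfl, if_pos hTake]
      · push_neg at hpre
        obtain ⟨hp1, hp2⟩ := hpre
        have hs1 : PySem.Chars.startswith cs ['/'] = false := by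
          cases h : PySem.Chars.startswith cs ['/']
          · rfl
          · exact absurd ((pv_singleton_prefix_iff _ _).mp ((PySem.Chars.startswith_iff _ _).mp h)) hp1
        have hs2 : PySem.Chars.startswith cs ['\\'] = false := by
          cases h : PySem.Chars.startswith cs ['\\']
          · rfl
          · exact absurd ((pv_singleton_prefix_iff _ _).mp ((PySem.Chars.startswith_iff _ _).mp h)) hp2
        rw [hs1, hs2]
        simp only [Bool.or_self, Bool.false_eq_true, if_false]
        have hTake : ¬(cs.take 1 = ['/'] ∨ cs.take 1 = ['\\']) := by
          rw [pv_take_one_eq_iff, pv_take_one_eq_iff]; tauto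
        rw [if_neg hTake]
        by_cases hdang : ∃ c ∈ cs, c ∈ pvDangerousA
        · have hA : pvDangerousA.any (fun ch => PySem.Chars.isIn [ch] cs) = true := by
            obtain ⟨c, hcm, hcd⟩ := hdang
            exact List.any_eq_true.mpr ⟨c, hcd,
              (PySem.Chars.isIn_iff_infix [c] cs).mpr ((List.singleton_infix_iff c cs).mpr hcm)⟩
          have hB : pvScan none cs = false :=
            (pvScan_eq_false_iff cs none).mpr (Or.inl hdang)
          rw [hA, if_pos rfl, hB]
        · have hA : pvDangerousA.any (fun ch => PySem.Chars.isIn [ch] cs) = false := by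
            cases h : pvDangerousA.any (fun ch => PySem.Chars.isIn [ch] cs)
            · rfl
            · obtain ⟨c, hcd, hin⟩ := List.any_eq_true.mp h
              exact absurd ⟨c, (List.singleton_infix_iff c cs).mp
                ((PySem.Chars.isIn_iff_infix [c] cs).mp hin), hcd⟩ hdang
          have hB : pvScan none cs = true := by
            cases h : pvScan none cs
            · exfalso
              rcases (pvScan_eq_false_iff cs none).mp h with hd | hi | hi | ⟨hp, _⟩ | ⟨hp, _⟩
              · exact hdang hd
              · exact hdot hi
              · exact hslash hi
              · simp at hp
              · simp at hp
            · rfl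
          rw [hA, hB]
          simp

-- ===== VERDICT (by name: the statement is the Claim_ definition above) =====
theorem validate_file_path_spec : Claim_equal_validate_file_path := by
  intro path _
  show validate_file_path path = validate_file_path_alt path
  exact pv_bodies_eq path.toList
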